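-- pv_equiv track=rewrite | github.com/PengNi/dsim_module | main.py | idmapping_test
-- ===== SOURCE A (Python) =====
-- def idmapping_test(testids, allids, itype='omim', prefix=False):
--     testidmap = {}
--     for mids in allids:
--         if itype in mids.keys():
--             tids = mids[itype]
--             for tid in tids:
--                 idtemp = tid
--                 if not prefix:
--                     idtemp = str(idtemp).split(":")[1]
--                 if idtemp in testids:
--                     if idtemp not in testidmap.keys():
--                         testidmap[idtemp] = {}
--                     for mk in mids.keys():
--                         if mk not in testidmap[idtemp].keys():
--                             testidmap[idtemp][mk] = set()
--                         testidmap[idtemp][mk].update(mids[mk])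
--     return testidmap
-- ===== SOURCE B (Python) =====
-- def idmapping_test(testids, allids, itype='omim', prefix=False):
--     wanted = set(testids)
--     index = {}
--     for mids in allids:
--         if itype in mids:
--             for tid in mids[itype]:
--                 idtemp = tid
--                 if not prefix:
--                     idtemp = str(idtemp).split(":")[1]
--                 if idtemp in wanted:
--                     index.setdefault(idtemp, []).append(mids)
--     return {idtemp: _merge_records(recs) for idtemp, recs in index.items()}
--
--
-- def _merge_records(recs):
--     merged = {}
--     for mids in recs:
--         for mk in mids:
--             if mk not in merged:
--                 merged[mk] = set()
--             merged[mk].update(mids[mk])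
--     return merged
-- ===== Notes on version B (the rewrite author's own statement) =====
-- stated objective: alternative
-- what changed: A's single interleaved detect-and-merge scan becomes an index-building pass (test id -> list of matching records, with membership tested against a set built once from testids) followed by a separate per-id aggregation pass over the index; it trades one pass for two differently-shaped passes at the same overall cost.
import Mathlib
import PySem

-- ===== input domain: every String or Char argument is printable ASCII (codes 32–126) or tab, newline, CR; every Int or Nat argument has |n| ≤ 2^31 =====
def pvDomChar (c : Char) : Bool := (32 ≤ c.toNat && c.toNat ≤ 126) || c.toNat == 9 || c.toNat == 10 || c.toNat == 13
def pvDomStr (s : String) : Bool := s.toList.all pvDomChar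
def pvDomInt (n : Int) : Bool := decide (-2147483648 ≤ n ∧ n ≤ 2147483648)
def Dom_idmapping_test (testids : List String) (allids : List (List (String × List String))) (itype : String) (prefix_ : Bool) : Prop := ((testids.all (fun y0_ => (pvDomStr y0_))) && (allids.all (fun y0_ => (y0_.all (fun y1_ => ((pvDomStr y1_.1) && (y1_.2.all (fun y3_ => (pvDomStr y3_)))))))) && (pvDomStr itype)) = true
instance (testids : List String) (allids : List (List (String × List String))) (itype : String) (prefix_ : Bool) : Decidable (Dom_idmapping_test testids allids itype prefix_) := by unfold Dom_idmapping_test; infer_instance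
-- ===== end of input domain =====

-- B replaces A's single interleaved detect-and-merge scan by an index pass (test id -> matching records)
-- followed by a per-id aggregation pass, and tests membership in a set built once from testids.

-- shared dict-on-assoc-list helpers ('k in mids', 'mids[k]') and the idtemp computation
def pvKeyIn (mids : List (String × List String)) (k : String) : Bool := mids.any (fun p => p.1 == k)
def pvLookup (mids : List (String × List String)) (k : String) : List String :=
  ((mids.find? (fun p => p.1 == k)).map Prod.snd).getD []
-- idtemp = tid; if not prefix: idtemp = str(idtemp).split(":")[1]  (IndexError = out of range; Pre_ excludes it)
def pvIdtemp (prefix_ : Bool) (tid : String) : String :=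
  if prefix_ then tid else PySem.List.pyGetD ((PySem.Str.split? tid ":").getD []) 1 ""

-- ===== PORT A =====
def idmapping_test (testids : List String) (allids : List (List (String × List String))) (itype : String) (prefix_ : Bool) : List (String × List (String × List String)) :=
  (allids.foldl (fun td mids =>
    if pvKeyIn mids itype then
      (pvLookup mids itype).foldl (fun td tid =>
        let idtemp := pvIdtemp prefix_ tid
        if testids.contains idtemp then
          -- 'if idtemp not in testidmap: testidmap[idtemp] = {}' + in-place merge of mids into testidmap[idtemp]
          td.insert idtemp ((mids.map Prod.fst).foldl
            (fun inn mk => inn.insert mk (PySem.Set.update (inn.getD mk PySem.Set.empty) (pvLookup mids mk)))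
            (td.getD idtemp PySem.Dict.empty))
        else td) td
    else td) (PySem.Dict.empty : PySem.Dict String (PySem.Dict String (PySem.Set String)))).items.map
      (fun p => (p.1, p.2.items))

-- ===== PORT B =====
-- Source B's _merge_records: fold every record's keys into one dict of sets
def pvMergeRecords (recs : List (List (String × List String))) : PySem.Dict String (PySem.Set String) :=
  recs.foldl (fun merged mids =>
    (mids.map Prod.fst).foldl
      (fun inn mk => inn.insert mk (PySem.Set.update (inn.getD mk PySem.Set.empty) (pvLookup mids mk)))
      merged) PySem.Dict.empty

def idmapping_test_alt (testids : List String) (allids : List (List (String × List String))) (itype : String) (prefix_ : Bool) : List (String × List (String × List String)) :=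
  let wanted : PySem.Set String := PySem.Set.ofList testids
  let ix : PySem.Dict String (List (List (String × List String))) :=
    allids.foldl (fun ix mids =>
      if pvKeyIn mids itype then
        (pvLookup mids itype).foldl (fun ix tid =>
          let idtemp := pvIdtemp prefix_ tid
          if PySem.Set.contains wanted idtemp then
            ix.insert idtemp (ix.getD idtemp [] ++ [mids])   -- index.setdefault(idtemp, []).append(mids)
          else ix) ix
      else ix) PySem.Dict.empty
  ix.items.map (fun p => (p.1, (pvMergeRecords p.2).items))

-- ===== PRECONDITION & SPEC =====
-- Pre_ excludes exactly the inputs where A raises IndexError: prefix False and some tid of a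
-- record containing the itype key has no ':' (split(":")[1] out of range).
def Pre_idmapping_test (testids : List String) (allids : List (List (String × List String))) (itype : String) (prefix_ : Bool) : Prop :=
  prefix_ = false → ∀ mids ∈ allids, pvKeyIn mids itype = true →
    ∀ tid ∈ pvLookup mids itype, 2 ≤ ((PySem.Str.split? tid ":").getD []).length
instance (testids : List String) (allids : List (List (String × List String))) (itype : String) (prefix_ : Bool) : Decidable (Pre_idmapping_test testids allids itype prefix_) := by unfold Pre_idmapping_test; infer_instance

def pvWitness_idmapping_test : List String × (List (List (String × List String))) × String × Bool :=
  (["123", "7"], [[("omim", ["MIM:123"]), ("gene", ["g1", "g2"])], [("other", ["x"])]], "omim", false)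

def Spec_idmapping_test (testids : List String) (allids : List (List (String × List String))) (itype : String) (prefix_ : Bool) (out : List (String × List (String × List String))) : Prop := out = idmapping_test_alt testids allids itype prefix_
instance (testids : List String) (allids : List (List (String × List String))) (itype : String) (prefix_ : Bool) (out : List (String × List (String × List String))) : Decidable (Spec_idmapping_test testids allids itype prefix_ out) := by unfold Spec_idmapping_test; infer_instance

-- ===== CLAIM (what is proved, stated in full; the proofs are below) =====
def Claim_equal_idmapping_test : Prop := ∀ (testids : List String) (allids : List (List (String × List String))) (itype : String) (prefix_ : Bool), Dom_idmapping_test testids allids itype prefix_ → Pre_idmapping_test testids allids itype prefix_ → Spec_idmapping_test testids allids itype prefix_ (idmapping_test testids allids itype prefix_)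

-- ===== LEMMAS AND PROOFS =====

-- value map that relates B's index entries to A's merged entries
def pvG (p : String × List (List (String × List String))) : String × PySem.Dict String (PySem.Set String) :=
  (p.1, pvMergeRecords p.2)

theorem pvWitness_ok : Dom_idmapping_test pvWitness_idmapping_test.1 pvWitness_idmapping_test.2.1 pvWitness_idmapping_test.2.2.1 pvWitness_idmapping_test.2.2.2 ∧ Pre_idmapping_test pvWitness_idmapping_test.1 pvWitness_idmapping_test.2.1 pvWitness_idmapping_test.2.2.1 pvWitness_idmapping_test.2.2.2 := by
  constructor <;> decide

theorem contains_set_ofList (xs : List String) (x : String) :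
    PySem.Set.contains (PySem.Set.ofList xs) x = xs.contains x := by
  simp [PySem.Set.contains, List.contains_eq_mem, PySem.Set.mem_ofList]

theorem get?_items_map_pvG (ix : PySem.Dict String (List (List (String × List String)))) (k : String) :
    (PySem.Dict.mk (ix.items.map pvG)).get? k = (ix.get? k).map pvMergeRecords := by
  simp only [PySem.Dict.get?, List.find?_map]
  have hpred : ((fun (p : String × PySem.Dict String (PySem.Set String)) => p.1 == k) ∘ pvG)
      = (fun (p : String × List (List (String × List String))) => p.1 == k) := rfl
  rw [hpred]
  cases List.find? (fun p => p.1 == k) ix.items <;> simp [pvG]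

theorem contains_items_map_pvG (ix : PySem.Dict String (List (List (String × List String)))) (k : String) :
    (PySem.Dict.mk (ix.items.map pvG)).contains k = ix.contains k := by
  simp only [PySem.Dict.contains, List.any_map]
  have hpred : ((fun (p : String × PySem.Dict String (PySem.Set String)) => p.1 == k) ∘ pvG)
      = (fun (p : String × List (List (String × List String))) => p.1 == k) := rfl
  rw [hpred]

theorem insert_items_map_pvG (ix : PySem.Dict String (List (List (String × List String)))) (k : String) (v : List (List (String × List String))) :
    (PySem.Dict.mk (ix.items.map pvG)).insert k (pvMergeRecords v) = PySem.Dict.mk ((ix.insert k v).items.map pvG) := by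
  simp only [PySem.Dict.insert, contains_items_map_pvG]
  split
  · simp only [List.map_map]
    congr 1
    apply List.map_congr_left
    intro p _
    by_cases h : p.1 = k <;> simp [pvG, h]
  · simp [pvG]

theorem sim_tids (testids : List String) (prefix_ : Bool)
    (mids : List (String × List String)) (tids : List String)
    (d : PySem.Dict String (PySem.Dict String (PySem.Set String)))
    (ix : PySem.Dict String (List (List (String × List String))))
    (h : d = PySem.Dict.mk (ix.items.map pvG)) :
    tids.foldl (fun td tid =>
        let idtemp := pvIdtemp prefix_ tid
        if testids.contains idtemp then
          td.insert idtemp ((mids.map Prod.fst).foldl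
            (fun inn mk => inn.insert mk (PySem.Set.update (inn.getD mk PySem.Set.empty) (pvLookup mids mk)))
            (td.getD idtemp PySem.Dict.empty))
        else td) d
    = PySem.Dict.mk ((tids.foldl (fun ix tid =>
        let idtemp := pvIdtemp prefix_ tid
        if PySem.Set.contains (PySem.Set.ofList testids) idtemp then
          ix.insert idtemp (ix.getD idtemp [] ++ [mids])
        else ix) ix).items.map pvG) := by
  induction tids generalizing d ix with
  | nil => simpa using h
  | cons tid rest IH =>
    simp only [List.foldl_cons]
    rw [contains_set_ofList]
    by_cases hc : testids.contains (pvIdtemp prefix_ tid)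
    · simp only [hc, if_true]
      apply IH
      subst h
      rw [← insert_items_map_pvG]
      congr 1
      -- merged value correspondence: A's getD-then-merge equals pvMergeRecords of the appended list
      have hget : (PySem.Dict.mk (ix.items.map pvG)).getD (pvIdtemp prefix_ tid) PySem.Dict.empty
          = pvMergeRecords (ix.getD (pvIdtemp prefix_ tid) []) := by
        simp only [PySem.Dict.getD, get?_items_map_pvG]
        cases ix.get? (pvIdtemp prefix_ tid) <;> simp [pvMergeRecords]
      rw [hget]
      simp [pvMergeRecords, List.foldl_append]
    · simp only [hc]
      exact IH d ix h

theorem sim_all (testids : List String) (itype : String) (prefix_ : Bool)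
    (allids : List (List (String × List String)))
    (d : PySem.Dict String (PySem.Dict String (PySem.Set String)))
    (ix : PySem.Dict String (List (List (String × List String))))
    (h : d = PySem.Dict.mk (ix.items.map pvG)) :
    allids.foldl (fun td mids =>
      if pvKeyIn mids itype then
        (pvLookup mids itype).foldl (fun td tid =>
          let idtemp := pvIdtemp prefix_ tid
          if testids.contains idtemp then
            td.insert idtemp ((mids.map Prod.fst).foldl
              (fun inn mk => inn.insert mk (PySem.Set.update (inn.getD mk PySem.Set.empty) (pvLookup mids mk)))
              (td.getD idtemp PySem.Dict.empty))
          else td) td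
      else td) d
    = PySem.Dict.mk ((allids.foldl (fun ix mids =>
        if pvKeyIn mids itype then
          (pvLookup mids itype).foldl (fun ix tid =>
            let idtemp := pvIdtemp prefix_ tid
            if PySem.Set.contains (PySem.Set.ofList testids) idtemp then
              ix.insert idtemp (ix.getD idtemp [] ++ [mids])
            else ix) ix
        else ix) ix).items.map pvG) := by
  induction allids generalizing d ix with
  | nil => simpa using h
  | cons mids rest IH =>
    simp only [List.foldl_cons]
    by_cases hk : pvKeyIn mids itype
    · simp only [hk, if_true]
      exact IH _ _ (sim_tids testids prefix_ mids (pvLookup mids itype) d ix h)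
    · simp only [hk]
      exact IH d ix h

-- ===== VERDICT (by name: the statement is the Claim_ definition above) =====
theorem idmapping_test_spec : Claim_equal_idmapping_test := by
  intro testids allids itype prefix_ _ _
  unfold Spec_idmapping_test idmapping_test idmapping_test_alt
  rw [sim_all testids itype prefix_ allids PySem.Dict.empty PySem.Dict.empty rfl]
  simp [pvG, List.map_map, Function.comp]
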